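-- pv_equiv track=rewrite | github.com/rohankasar/BWPY2022 | Assignment 1/Q13.Remove Nth Occurance.py | remove_nth_occurrence
-- ===== SOURCE A (Python) =====
-- def remove_nth_occurrence(word, string, n):
--     words = string.split()
--     count = 0
--     for i, w in enumerate(words):
--         if w == word:
--             count += 1
--             if count == n:
--                 del words[i]
--                 break
--     return ' '.join(words)
-- ===== SOURCE B (Python) =====
-- def remove_nth_occurrence(word, string, n):
--     words = string.split()
--     occ = [i for i, w in enumerate(words) if w == word]
--     if 0 < n <= len(occ):
--         del words[occ[n - 1]]
--     return ' '.join(words)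
-- ===== Notes on version B (the rewrite author's own statement) =====
-- stated objective: alternative
-- what changed: B builds the table of all occurrence positions in one comprehension and deletes by a direct bounds-checked index, instead of A's interleaved scan that counts, deletes and breaks inside the loop.
import Mathlib
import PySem

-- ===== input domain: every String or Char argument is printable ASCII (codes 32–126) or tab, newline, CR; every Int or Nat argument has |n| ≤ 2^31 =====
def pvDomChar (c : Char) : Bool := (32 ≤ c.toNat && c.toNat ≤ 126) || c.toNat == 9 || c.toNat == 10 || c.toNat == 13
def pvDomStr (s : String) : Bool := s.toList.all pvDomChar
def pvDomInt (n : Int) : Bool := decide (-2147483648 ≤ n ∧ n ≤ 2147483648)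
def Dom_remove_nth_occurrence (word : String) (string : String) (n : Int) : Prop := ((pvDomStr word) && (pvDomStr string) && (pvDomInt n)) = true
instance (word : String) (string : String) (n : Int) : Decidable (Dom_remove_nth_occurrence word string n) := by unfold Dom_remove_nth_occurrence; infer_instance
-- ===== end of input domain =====

-- B replaces A's interleaved count-delete-break loop by a first pass collecting all
-- occurrence positions and one bounds-checked indexed deletion (objective: alternative).

-- ===== PORT A =====
-- the for-loop over enumerate(words): count matches, del words[i] and break at the nth
def pvLoopA (word : String) (n : Int) : List (Int × String) → Int → List String → List String
  | [], _, ws => ws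
  | (i, w) :: rest, count, ws =>
    if w == word then
      if count + 1 == n then ws.eraseIdx i.toNat   -- del words[i]; i ≥ 0 from enumerate, exact
      else pvLoopA word n rest (count + 1) ws
    else pvLoopA word n rest count ws

def remove_nth_occurrence (word : String) (string : String) (n : Int) : String :=
  let words := PySem.Str.split₀ string
  PySem.Str.join " " (pvLoopA word n (PySem.List.enumerate words) 0 words)

-- ===== PORT B =====
def remove_nth_occurrence_alt (word : String) (string : String) (n : Int) : String :=
  let words := PySem.Str.split₀ string
  let occ := ((PySem.List.enumerate words).filter (fun p => p.2 == word)).map Prod.fst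
  let words' :=
    if 0 < n ∧ n ≤ (occ.length : Int) then
      -- occ[n-1]: in range under the guard, so getD's default is never used
      words.eraseIdx (occ.getD (n - 1).toNat 0).toNat
    else words
  PySem.Str.join " " words'

-- ===== PRECONDITION & SPEC =====
def Spec_remove_nth_occurrence (word : String) (string : String) (n : Int) (out : String) : Prop := out = remove_nth_occurrence_alt word string n
instance (word : String) (string : String) (n : Int) (out : String) : Decidable (Spec_remove_nth_occurrence word string n out) := by unfold Spec_remove_nth_occurrence; infer_instance

-- ===== CLAIM (what is proved, stated in full; the proofs are below) =====
def Claim_equal_remove_nth_occurrence : Prop := ∀ (word : String) (string : String) (n : Int), Dom_remove_nth_occurrence word string n → Spec_remove_nth_occurrence word string n (remove_nth_occurrence word string n)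

-- ===== LEMMAS AND PROOFS =====

-- A's scan with running count c equals one indexed deletion at the (n-c)-th collected position
lemma pvLoopA_eq (word : String) (n : Int) (l : List (Int × String)) (c : Int) (ws : List String) :
    pvLoopA word n l c ws =
      (if c < n ∧ n ≤ c + ((l.filter (fun p => p.2 == word)).map Prod.fst).length then
        ws.eraseIdx (((l.filter (fun p => p.2 == word)).map Prod.fst).getD (n - c - 1).toNat 0).toNat
      else ws) := by
  induction l generalizing c with
  | nil => simp [pvLoopA]
  | cons p rest ih =>
    obtain ⟨i, w⟩ := p
    have occnn : (0:Int) ≤ ((rest.filter (fun p => p.2 == word)).map Prod.fst).length := by positivity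
    by_cases hw : w == word
    · simp only [pvLoopA, hw, if_true, List.filter_cons, List.map_cons, List.length_cons]
      by_cases hn : c + 1 == n
      · have hn' : n = c + 1 := by have := of_decide_eq_true hn; omega
        rw [if_pos hn]
        push_cast
        split_ifs with h
        · have hidx : (n - c - 1).toNat = 0 := by omega
          rw [hidx]; simp
        · exfalso; omega
      · have hne : ¬ c + 1 = n := fun h => hn (by simp [h])
        rw [if_neg hn, ih (c + 1)]
        push_cast
        split_ifs with h1 h2 h2
        · have hk : (n - c - 1).toNat = (n - (c + 1) - 1).toNat + 1 := by omega
          rw [hk]; simp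
        · exfalso; omega
        · exfalso; omega
        · rfl
    · simp only [pvLoopA, hw, List.filter_cons]
      simp only [Bool.false_eq_true, if_false]
      exact ih c

-- ===== VERDICT (by name: the statement is the Claim_ definition above) =====
theorem remove_nth_occurrence_spec : Claim_equal_remove_nth_occurrence := by
  intro word string n _
  unfold Spec_remove_nth_occurrence remove_nth_occurrence remove_nth_occurrence_alt
  simp only []
  rw [pvLoopA_eq]
  simp
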